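-- pv_equiv track=rewrite | github.com/tosinabase/cs_tasks | from_children_to_end_node_paths.py | end_reachable_from_children
-- ===== SOURCE A (Python) =====
-- def inverse_graph(vertices, edges):
--     new_edges = [list() for i in range(0, len(vertices))]
--     j = 0
--     for children in edges:
--         for child in children:
--             new_edges[child].append(j)
--         j += 1
--     return new_edges
--
-- def end_reachable_from_children(vertices, edges):
--
--     if len(edges) == 0:
--         return False
--
--     nodes = [vertices[-1]]
--     local_nodes = []
--     reverse_edges = inverse_graph(vertices, edges)
--     existed_path_from_end = [False for i in edges]
--
--     while len(nodes) != 0: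
--         for node in nodes:
--             if not existed_path_from_end[node]:
--                 local_nodes.extend(reverse_edges[node])
--                 existed_path_from_end[node] = True
--         nodes = local_nodes
--         local_nodes = []
--
--     t = True
--     for child in edges[0]:
--         t = existed_path_from_end[child] and t
--
--     return t
-- ===== SOURCE B (Python) =====
-- def end_reachable_from_children(vertices, edges):
--     # Forward fixed-point saturation over a reachability table: no reverse graph, no worklist.
--     if len(edges) == 0:
--         return False
--     reach = [False] * len(edges)
--     reach[vertices[-1]] = True
--     for _ in range(len(edges)):
--         for j, children in enumerate(edges):
--             if not reach[j] and any(reach[c] for c in children):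
--                 reach[j] = True
--     return all(reach[c] for c in edges[0])
-- ===== Notes on version B (the rewrite author's own statement) =====
-- stated objective: alternative
-- what changed: Replaces the reverse-graph construction plus worklist BFS from the end node by a forward fixed-point saturation: a boolean reachability table seeded at edges-index vertices[-1] is swept n times, marking every index whose edge list contains a child already marked, then the children of edges[0] are tested.
-- outside the precondition, e.g. on end_reachable_from_children([-4, 1, 4, -3], [[-2], [0], []]): A returns False, B returns True; on end_reachable_from_children([-3, -2, -4, 2], [[], [3, 2], [-3]]): A returns True, B raises IndexError
import Mathlib
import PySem

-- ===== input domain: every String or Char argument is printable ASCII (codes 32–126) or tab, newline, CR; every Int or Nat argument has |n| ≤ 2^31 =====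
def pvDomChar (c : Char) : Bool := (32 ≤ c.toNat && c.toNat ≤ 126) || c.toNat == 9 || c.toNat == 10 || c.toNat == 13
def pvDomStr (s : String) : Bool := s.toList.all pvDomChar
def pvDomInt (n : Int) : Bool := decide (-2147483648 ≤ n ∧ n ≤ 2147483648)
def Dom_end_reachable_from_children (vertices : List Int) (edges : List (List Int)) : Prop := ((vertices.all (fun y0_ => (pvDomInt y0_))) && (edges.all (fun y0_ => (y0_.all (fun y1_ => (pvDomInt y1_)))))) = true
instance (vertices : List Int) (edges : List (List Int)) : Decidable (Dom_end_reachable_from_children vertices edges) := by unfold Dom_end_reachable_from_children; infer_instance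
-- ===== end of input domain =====

-- B replaces A's reverse-graph construction + worklist BFS from the end node by a forward
-- fixed-point saturation over a boolean reachability table (alternative decomposition, same value).


-- ===== PORT A =====
-- new_edges[child].append(j)  (Python indexing, negative from the end; none = IndexError, outside Pre_)
def pyAppendAt (ls : List (List Int)) (i : Int) (x : Int) : List (List Int) :=
  match PySem.List.pyGet? ls i with
  | some l => PySem.List.pySetD ls i (l ++ [x])
  | none => ls

def inverse_graph (vertices : List Int) (edges : List (List Int)) : List (List Int) :=
  let init := (PySem.List.pyRange 0 vertices.length 1).map (fun _ => ([] : List Int))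
  (edges.foldl
    (fun (st : List (List Int) × Int) children =>
      (children.foldl (fun acc child => pyAppendAt acc child st.2) st.1, st.2 + 1))
    (init, 0)).1

-- body of the 'for node in nodes' pass (marks the node, extends local_nodes)
def stepA (revE : List (List Int)) (st : List Bool × List Int) (node : Int) : List Bool × List Int :=
  if PySem.List.pyGetD st.1 node true = false then
    (PySem.List.pySetD st.1 node true, st.2 ++ PySem.List.pyGetD revE node [])
  else st

-- the 'while len(nodes) != 0' loop; fuel 2*len(edges)+2 is proved sufficient below
def loopA (revE : List (List Int)) : Nat → List Bool → List Int → List Bool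
  | 0, existed, _ => existed
  | fuel+1, existed, nodes =>
    if nodes.isEmpty then existed
    else
      let st := nodes.foldl (stepA revE) (existed, [])
      loopA revE fuel st.1 st.2

def end_reachable_from_children (vertices : List Int) (edges : List (List Int)) : Bool :=
  if edges.length = 0 then false
  else
    let nodes : List Int := [PySem.List.pyGetD vertices (-1) 0]
    let reverse_edges := inverse_graph vertices edges
    let existed : List Bool := edges.map (fun _ => false)
    let existedF := loopA reverse_edges (2 * edges.length + 2) existed nodes
    (PySem.List.pyGetD edges 0 []).foldl
      (fun t child => PySem.List.pyGetD existedF child false && t) true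

-- ===== PORT B =====
-- one round of  for j, children in enumerate(edges): if not reach[j] and any(reach[c] …): reach[j] = True
def stepB (r : List Bool) (p : Int × List Int) : List Bool :=
  if !PySem.List.pyGetD r p.1 false && p.2.any (fun c => PySem.List.pyGetD r c false) then
    PySem.List.pySetD r p.1 true
  else r

def passB (edges : List (List Int)) (reach : List Bool) : List Bool :=
  (PySem.List.enumerate edges).foldl stepB reach

def end_reachable_from_children_alt (vertices : List Int) (edges : List (List Int)) : Bool :=
  if edges.length = 0 then false
  else
    let reach0 : List Bool := List.replicate edges.length false
    let reach1 := PySem.List.pySetD reach0 (PySem.List.pyGetD vertices (-1) 0) true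
    let reachF := (PySem.List.pyRange 0 edges.length 1).foldl (fun r _ => passB edges r) reach1
    (PySem.List.pyGetD edges 0 []).all (fun c => PySem.List.pyGetD reachF c false)

-- ===== PRECONDITION & SPEC =====
-- Pre_ keeps the square adjacency lists (one edge list per vertex, indices in [-n, n), Python's
-- negative indices allowed); it excludes inputs where A raises IndexError (empty vertices,
-- an index out of range) and ragged inputs (len(edges) ≠ len(vertices)), where A's two
-- differently-sized arrays make its answer an artefact of mismatched index wraparound.
def Pre_end_reachable_from_children (vertices : List Int) (edges : List (List Int)) : Prop :=
  edges = [] ∨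
    (vertices ≠ [] ∧ edges.length = vertices.length ∧
      (∀ l ∈ edges, ∀ c ∈ l, -(edges.length : Int) ≤ c ∧ c < (edges.length : Int)) ∧
      -(edges.length : Int) ≤ vertices.getLastD 0 ∧ vertices.getLastD 0 < (edges.length : Int))
instance (vertices : List Int) (edges : List (List Int)) : Decidable (Pre_end_reachable_from_children vertices edges) := by unfold Pre_end_reachable_from_children; infer_instance

def pvWitness_end_reachable_from_children : List Int × List (List Int) := ([0, 1], [[1], [1]])

def Spec_end_reachable_from_children (vertices : List Int) (edges : List (List Int)) (out : Bool) : Prop := out = end_reachable_from_children_alt vertices edges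
instance (vertices : List Int) (edges : List (List Int)) (out : Bool) : Decidable (Spec_end_reachable_from_children vertices edges out) := by unfold Spec_end_reachable_from_children; infer_instance

-- ===== CLAIM (what is proved, stated in full; the proofs are below) =====
def Claim_equal_end_reachable_from_children : Prop := ∀ (vertices : List Int) (edges : List (List Int)), Dom_end_reachable_from_children vertices edges → Pre_end_reachable_from_children vertices edges → Spec_end_reachable_from_children vertices edges (end_reachable_from_children vertices edges)

-- ===== LEMMAS AND PROOFS =====

-- Python's index i into a length-n list lands on slot sl n i (negative i counts from the end).
def sl (n : Nat) (i : Int) : Nat := if 0 ≤ i then i.toNat else n - (-i).toNat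

-- Both programs compute the least set S of slots with: the end slot is in S, and j ∈ S whenever
-- some child of edges[j] lands (as a slot) in S.  A's marked array and B's saturated table are
-- both proved to be that least set, hence they agree on the children of edges[0].
def ClosedSet (edges : List (List Int)) (ts : Nat) (S : Nat → Prop) : Prop :=
  S ts ∧ ∀ j : Nat, j < edges.length → (∃ c ∈ edges.getD j [], S (sl edges.length c)) → S j

-- ---- indexing bridges ----
theorem sl_lt (n : Nat) (i : Int) (h0 : -(n : Int) ≤ i) (h1 : i < (n : Int)) : sl n i < n := by
  unfold sl; split_ifs <;> omega

theorem pyIdx?_sl (n : Nat) (i : Int) (h0 : -(n : Int) ≤ i) (h1 : i < (n : Int)) :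
    PySem.List.pyIdx? n i = some (sl n i) := by
  unfold PySem.List.pyIdx? sl
  split_ifs <;> simp_all

theorem pyGet?_sl {α : Type} (l : List α) (i : Int) (h0 : -(l.length : Int) ≤ i)
    (h1 : i < (l.length : Int)) :
    PySem.List.pyGet? l i = l[sl l.length i]? := by
  unfold PySem.List.pyGet?
  rw [pyIdx?_sl l.length i h0 h1]
  rfl

theorem pyGetD_sl {α : Type} (l : List α) (i : Int) (d d' : α) (h0 : -(l.length : Int) ≤ i)
    (h1 : i < (l.length : Int)) :
    PySem.List.pyGetD l i d = l.getD (sl l.length i) d' := by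
  have hs := sl_lt l.length i h0 h1
  unfold PySem.List.pyGetD
  rw [pyGet?_sl l i h0 h1, List.getElem?_eq_getElem hs, List.getD_eq_getElem l d' hs]
  rfl

theorem pySetD_sl {α : Type} (l : List α) (i : Int) (v : α) (h0 : -(l.length : Int) ≤ i)
    (h1 : i < (l.length : Int)) :
    PySem.List.pySetD l i v = l.set (sl l.length i) v := by
  unfold PySem.List.pySetD PySem.List.pySet?
  rw [pyIdx?_sl l.length i h0 h1]
  rfl

-- ---- generic list helpers ----
theorem getD_set_self {α : Type} (l : List α) (i : Nat) (b d : α) (h : i < l.length) :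
    (l.set i b).getD i d = b := by
  simp [List.getD_eq_getElem?_getD, h]

theorem getD_set_ne {α : Type} (l : List α) (i k : Nat) (b d : α) (h : k ≠ i) :
    (l.set i b).getD k d = l.getD k d := by
  simp [List.getD_eq_getElem?_getD, h.symm]

theorem count_false_set_true_le (xs : List Bool) (i : Nat) :
    (xs.set i true).count false ≤ xs.count false := by
  induction xs generalizing i with
  | nil => simp
  | cons b t ih =>
    cases i with
    | zero => cases b <;> simp
    | succ j => cases b <;> simpa [List.count_cons] using ih j

theorem count_false_set_true_lt (xs : List Bool) (i : Nat) (h : i < xs.length)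
    (hf : xs.getD i false = false) : (xs.set i true).count false < xs.count false := by
  induction xs generalizing i with
  | nil => simp at h
  | cons b t ih =>
    cases i with
    | zero => simp_all
    | succ j =>
      simp only [List.length_cons] at h
      have := ih j (by omega) (by simpa using hf)
      cases b <;> simpa [List.count_cons] using this

theorem foldl_const_iterate {α β : Type} (l : List α) (f : β → β) (s : β) :
    l.foldl (fun r _ => f r) s = f^[l.length] s := by
  induction l generalizing s <;> simp_all [Function.comp]

theorem foldl_and_all (l : List Int) (g : Int → Bool) (b : Bool) :
    l.foldl (fun t c => g c && t) b = (l.all g && b) := by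
  induction l generalizing b with
  | nil => simp
  | cons c t ih => cases hc : g c <;> simp [List.foldl_cons, hc, ih]

theorem all_congr_mem (l : List Int) (f g : Int → Bool) (h : ∀ x ∈ l, f x = g x) :
    l.all f = l.all g := by
  induction l with
  | nil => rfl
  | cons x t ih => simp [List.all_cons, h x (by simp), ih (fun y hy => h y (by simp [hy]))]

theorem getD_map_const_false (l : List (List Int)) (k : Nat) :
    ((l.map (fun _ => false))).getD k false = false := by
  induction l generalizing k with
  | nil => simp
  | cons x t ih => cases k <;> simp_all

theorem getD_replicate_false (n k : Nat) : (List.replicate n false).getD k false = false := by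
  induction n generalizing k with
  | zero => simp
  | succ m ih => cases k <;> simp_all [List.replicate_succ]

-- ---- inverse_graph characterization ----
theorem length_pyAppendAt (ls : List (List Int)) (i x : Int) :
    (pyAppendAt ls i x).length = ls.length := by
  unfold pyAppendAt
  cases h : PySem.List.pyGet? ls i <;> simp [PySem.List.length_pySetD]

theorem pyAppendAt_in (ls : List (List Int)) (i x : Int) (h0 : -(ls.length : Int) ≤ i)
    (h1 : i < (ls.length : Int)) :
    pyAppendAt ls i x = ls.set (sl ls.length i) (ls.getD (sl ls.length i) [] ++ [x]) := by
  have hs := sl_lt ls.length i h0 h1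
  unfold pyAppendAt
  rw [pyGet?_sl ls i h0 h1, List.getElem?_eq_getElem hs]
  show PySem.List.pySetD ls i (ls[sl ls.length i] ++ [x]) = _
  rw [pySetD_sl ls i _ h0 h1, List.getD_eq_getElem ls [] hs]

theorem getD_pyAppendAt (ls : List (List Int)) (i x : Int) (k : Nat)
    (h0 : -(ls.length : Int) ≤ i) (h1 : i < (ls.length : Int)) :
    (pyAppendAt ls i x).getD k [] =
      if k = sl ls.length i then ls.getD k [] ++ [x] else ls.getD k [] := by
  rw [pyAppendAt_in ls i x h0 h1]
  by_cases hk : k = sl ls.length i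
  · subst hk
    rw [if_pos rfl, getD_set_self _ _ _ _ (sl_lt ls.length i h0 h1)]
  · rw [if_neg hk, getD_set_ne _ _ _ _ _ hk]

theorem innerFold_length (children : List Int) (acc : List (List Int)) (j : Int) :
    (children.foldl (fun a c => pyAppendAt a c j) acc).length = acc.length := by
  induction children generalizing acc with
  | nil => rfl
  | cons c t ih => simp [List.foldl_cons, ih, length_pyAppendAt]

theorem innerFold_mem (children : List Int) (acc : List (List Int)) (j : Int)
    (hc : ∀ c ∈ children, -(acc.length : Int) ≤ c ∧ c < (acc.length : Int)) (k : Nat) (x : Int) :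
    x ∈ (children.foldl (fun a c => pyAppendAt a c j) acc).getD k [] ↔
      x ∈ acc.getD k [] ∨ (x = j ∧ ∃ c ∈ children, sl acc.length c = k) := by
  induction children generalizing acc with
  | nil => simp
  | cons c t ih =>
    have hcb := hc c (by simp)
    rw [List.foldl_cons, ih _ (fun c' hc' => by
      rw [length_pyAppendAt]; exact hc c' (by simp [hc']))]
    rw [length_pyAppendAt, getD_pyAppendAt acc c j k hcb.1 hcb.2]
    by_cases hk : k = sl acc.length c
    · rw [if_pos hk]
      simp only [List.mem_append, List.mem_cons, List.not_mem_nil, or_false]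
      constructor
      · rintro ((h | h) | h)
        · exact Or.inl h
        · exact Or.inr ⟨h, c, Or.inl rfl, hk.symm⟩
        · obtain ⟨rfl, c', hc', hs⟩ := h
          exact Or.inr ⟨rfl, c', Or.inr hc', hs⟩
      · rintro (h | ⟨rfl, c', (rfl | hc'), hs⟩)
        · exact Or.inl (Or.inl h)
        · exact Or.inl (Or.inr rfl)
        · exact Or.inr ⟨rfl, c', hc', hs⟩
    · rw [if_neg hk]
      simp only [List.mem_cons]
      constructor
      · rintro (h | ⟨rfl, c', hc', hs⟩)
        · exact Or.inl h
        · exact Or.inr ⟨rfl, c', Or.inr hc', hs⟩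
      · rintro (h | ⟨rfl, c', (rfl | hc'), hs⟩)
        · exact Or.inl h
        · exact absurd hs.symm hk
        · exact Or.inr ⟨rfl, c', hc', hs⟩

theorem outerFold_length (es : List (List Int)) (acc : List (List Int)) (j0 : Int) :
    ((es.foldl
      (fun (st : List (List Int) × Int) children =>
        (children.foldl (fun a c => pyAppendAt a c st.2) st.1, st.2 + 1))
      (acc, j0)).1).length = acc.length := by
  induction es generalizing acc j0 with
  | nil => rfl
  | cons e t ih => simp [List.foldl_cons, ih, innerFold_length]

theorem outerFold_mem (es : List (List Int)) (acc : List (List Int)) (j0 : Int)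
    (hc : ∀ l ∈ es, ∀ c ∈ l, -(acc.length : Int) ≤ c ∧ c < (acc.length : Int)) (k : Nat)
    (x : Int) :
    x ∈ ((es.foldl
      (fun (st : List (List Int) × Int) children =>
        (children.foldl (fun a c => pyAppendAt a c st.2) st.1, st.2 + 1))
      (acc, j0)).1).getD k [] ↔
      x ∈ acc.getD k [] ∨
        ∃ i : Nat, i < es.length ∧ x = j0 + i ∧ ∃ c ∈ es.getD i [], sl acc.length c = k := by
  induction es generalizing acc j0 with
  | nil => simp
  | cons e t ih =>
    rw [List.foldl_cons]
    rw [ih _ _ (fun l hl c hcl => by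
      rw [innerFold_length]; exact hc l (by simp [hl]) c hcl)]
    rw [innerFold_mem e acc j0 (hc e (by simp)) k x, innerFold_length]
    constructor
    · rintro ((h | ⟨rfl, hk⟩) | ⟨i, hi, rfl, hk⟩)
      · exact Or.inl h
      · exact Or.inr ⟨0, by simp, by simp, by simpa using hk⟩
      · exact Or.inr ⟨i + 1, by simpa using hi, by push_cast; ring, by simpa using hk⟩
    · rintro (h | ⟨i, hi, rfl, hk⟩)
      · exact Or.inl (Or.inl h)
      · cases i with
        | zero => exact Or.inl (Or.inr ⟨by simp, by simpa using hk⟩)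
        | succ i =>
          exact Or.inr ⟨i, by simpa using hi, by push_cast; ring, by simpa using hk⟩

theorem length_inverse_graph (vertices : List Int) (edges : List (List Int)) :
    (inverse_graph vertices edges).length = vertices.length := by
  unfold inverse_graph
  rw [outerFold_length]
  simp [PySem.List.length_pyRange_one]

theorem mem_inverse_graph (vertices : List Int) (edges : List (List Int))
    (hE : ∀ l ∈ edges, ∀ c ∈ l, -(vertices.length : Int) ≤ c ∧ c < (vertices.length : Int))
    (k : Nat) (x : Int) :
    x ∈ (inverse_graph vertices edges).getD k [] ↔
      ∃ j : Nat, j < edges.length ∧ x = (j : Int) ∧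
        ∃ c ∈ edges.getD j [], sl vertices.length c = k := by
  unfold inverse_graph
  have hlen : ((PySem.List.pyRange 0 (vertices.length : Int) 1).map
      (fun _ => ([] : List Int))).length = vertices.length := by
    simp [PySem.List.length_pyRange_one]
  rw [outerFold_mem _ _ _ (fun l hl c hcl => by rw [hlen]; exact hE l hl c hcl)]
  rw [hlen]
  have : ((PySem.List.pyRange 0 (vertices.length : Int) 1).map
      (fun _ => ([] : List Int))).getD k [] = [] := by
    generalize PySem.List.pyRange 0 (vertices.length : Int) 1 = r
    induction r generalizing k with
    | nil => simp
    | cons a t ih => cases k <;> simp_all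
  rw [this]
  simp

-- ---- A's inner pass over nodes ----
theorem passA_spec (revE : List (List Int)) (nodes : List Int) (existed : List Bool)
    (acc : List Int) (hrv : revE.length = existed.length)
    (hr : ∀ v ∈ nodes, -(existed.length : Int) ≤ v ∧ v < (existed.length : Int)) :
    (nodes.foldl (stepA revE) (existed, acc)).1.length = existed.length ∧
    (∀ k : Nat, existed.getD k false = true →
      (nodes.foldl (stepA revE) (existed, acc)).1.getD k false = true) ∧
    (∀ v ∈ nodes,
      (nodes.foldl (stepA revE) (existed, acc)).1.getD (sl existed.length v) false = true) ∧
    (∀ k : Nat, (nodes.foldl (stepA revE) (existed, acc)).1.getD k false = true →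
      existed.getD k false = true ∨
        ((∃ v ∈ nodes, sl existed.length v = k) ∧
          ∀ x ∈ revE.getD k [], x ∈ (nodes.foldl (stepA revE) (existed, acc)).2)) ∧
    (∀ x ∈ acc, x ∈ (nodes.foldl (stepA revE) (existed, acc)).2) ∧
    (∀ x ∈ (nodes.foldl (stepA revE) (existed, acc)).2,
      x ∈ acc ∨ ∃ v ∈ nodes, x ∈ revE.getD (sl existed.length v) []) ∧
    ((nodes.foldl (stepA revE) (existed, acc)).1.count false ≤ existed.count false) ∧
    ((∃ v ∈ nodes, existed.getD (sl existed.length v) false = false) →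
      (nodes.foldl (stepA revE) (existed, acc)).1.count false < existed.count false) ∧
    ((∀ v ∈ nodes, existed.getD (sl existed.length v) false = true) →
      nodes.foldl (stepA revE) (existed, acc) = (existed, acc)) := by
  induction nodes generalizing existed acc with
  | nil =>
    refine ⟨rfl, fun k h => h, by simp, fun k h => Or.inl h, fun x h => h,
      fun x h => Or.inl h, le_refl _, ?_, fun _ => rfl⟩
    rintro ⟨v, hv, _⟩; simp at hv
  | cons v rest ih =>
    obtain ⟨hv0, hv1⟩ := hr v (by simp)
    have hvlt : sl existed.length v < existed.length := sl_lt _ _ hv0 hv1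
    rw [List.foldl_cons]
    by_cases hm : existed.getD (sl existed.length v) false = true
    · -- node already marked: stepA leaves the state unchanged
      have hstep : stepA revE (existed, acc) v = (existed, acc) := by
        unfold stepA
        rw [pyGetD_sl existed v true false hv0 hv1, hm]
        simp
      rw [hstep]
      obtain ⟨i1, i2, i3, i4, i5, i6, i7, i8, i9⟩ := ih existed acc hrv
        (fun w hw => hr w (by simp [hw]))
      refine ⟨i1, i2, ?_, ?_, i5, ?_, i7, ?_, ?_⟩
      · intro w hw
        rcases List.mem_cons.1 hw with rfl | hw
        · exact i2 _ hm
        · exact i3 w hw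
      · intro k hk
        rcases i4 k hk with h | ⟨⟨w, hw, hws⟩, h2⟩
        · exact Or.inl h
        · exact Or.inr ⟨⟨w, List.mem_cons_of_mem _ hw, hws⟩, h2⟩
      · intro x hx
        rcases i6 x hx with h | ⟨w, hw, h⟩
        · exact Or.inl h
        · exact Or.inr ⟨w, List.mem_cons_of_mem _ hw, h⟩
      · rintro ⟨w, hw, hwf⟩
        rcases List.mem_cons.1 hw with rfl | hw
        · rw [hm] at hwf; cases hwf
        · exact i8 ⟨w, hw, hwf⟩
      · intro hall
        exact i9 (fun w hw => hall w (List.mem_cons_of_mem _ hw))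
    · -- node unmarked: mark it and extend the accumulator with revE[node]
      have hmf : existed.getD (sl existed.length v) false = false := by
        cases h : existed.getD (sl existed.length v) false
        · rfl
        · exact absurd h hm
      have hstep : stepA revE (existed, acc) v =
          (existed.set (sl existed.length v) true,
            acc ++ revE.getD (sl existed.length v) []) := by
        unfold stepA
        rw [pyGetD_sl existed v true false hv0 hv1, hmf]
        have hbv : -(revE.length : Int) ≤ v ∧ v < (revE.length : Int) := by
          rw [hrv]; exact ⟨hv0, hv1⟩
        have : PySem.List.pyGetD revE v ([] : List Int) =
            revE.getD (sl revE.length v) [] := pyGetD_sl revE v [] [] hbv.1 hbv.2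
        simp [pySetD_sl existed v true hv0 hv1, this, hrv]
      rw [hstep]
      have hlen' : (existed.set (sl existed.length v) true).length = existed.length := by simp
      obtain ⟨i1, i2, i3, i4, i5, i6, i7, i8, i9⟩ :=
        ih (existed.set (sl existed.length v) true)
          (acc ++ revE.getD (sl existed.length v) [])
          (by rw [hlen', hrv])
          (fun w hw => by rw [hlen']; exact hr w (by simp [hw]))
      rw [hlen'] at i3 i4 i6 i8 i9
      have hmono : ∀ k : Nat, existed.getD k false = true →
          (existed.set (sl existed.length v) true).getD k false = true := by
        intro k hk
        by_cases hkv : k = sl existed.length v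
        · subst hkv; exact getD_set_self _ _ _ _ hvlt
        · rw [getD_set_ne _ _ _ _ _ hkv]; exact hk
      refine ⟨by rw [i1, hlen'], fun k hk => i2 k (hmono k hk), ?_, ?_, ?_, ?_, ?_, ?_, ?_⟩
      · intro w hw
        rcases List.mem_cons.1 hw with rfl | hw
        · exact i2 _ (getD_set_self _ _ _ _ hvlt)
        · exact i3 w hw
      · intro k hk
        rcases i4 k hk with h | ⟨⟨w, hw, hws⟩, h2⟩
        · by_cases hkv : k = sl existed.length v
          · subst hkv
            refine Or.inr ⟨⟨v, List.mem_cons_self .., rfl⟩, ?_⟩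
            intro x hx
            exact i5 x (List.mem_append_right _ hx)
          · rw [getD_set_ne _ _ _ _ _ hkv] at h
            exact Or.inl h
        · exact Or.inr ⟨⟨w, List.mem_cons_of_mem _ hw, hws⟩, h2⟩
      · intro x hx
        exact i5 x (List.mem_append_left _ hx)
      · intro x hx
        rcases i6 x hx with h | ⟨w, hw, h⟩
        · rcases List.mem_append.1 h with h | h
          · exact Or.inl h
          · exact Or.inr ⟨v, List.mem_cons_self .., h⟩
        · exact Or.inr ⟨w, List.mem_cons_of_mem _ hw, h⟩
      · exact le_trans i7 (count_false_set_true_le _ _)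
      · intro _
        exact lt_of_le_of_lt i7 (count_false_set_true_lt _ _ hvlt hmf)
      · intro hall
        exact absurd (hall v (List.mem_cons_self ..)) (by rw [hmf]; simp)

-- ---- A's while loop ----
theorem loopA_spec (vertices : List Int) (edges : List (List Int))
    (hE : ∀ l ∈ edges, ∀ c ∈ l, -(edges.length : Int) ≤ c ∧ c < (edges.length : Int))
    (hn : vertices.length = edges.length) (tgt : Int) (fuel : Nat) (existed : List Bool)
    (nodes : List Int)
    (hfuel : 2 * existed.count false + 2 ≤ fuel)
    (hlen2 : existed.length = edges.length)
    (hrange : ∀ v ∈ nodes, -(edges.length : Int) ≤ v ∧ v < (edges.length : Int))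
    (htgtI : existed.getD (sl edges.length tgt) false = true ∨ tgt ∈ nodes)
    (hclosed : ∀ k : Nat, existed.getD k false = true → ∀ j : Nat, j < edges.length →
      (∃ c ∈ edges.getD j [], sl edges.length c = k) →
      existed.getD j false = true ∨ (j : Int) ∈ nodes)
    (hsound : ∀ S : Nat → Prop, ClosedSet edges (sl edges.length tgt) S →
      (∀ k : Nat, existed.getD k false = true → S k) ∧ (∀ v ∈ nodes, S (sl edges.length v))) :
    (loopA (inverse_graph vertices edges) fuel existed nodes).length = edges.length ∧
    (loopA (inverse_graph vertices edges) fuel existed nodes).getD (sl edges.length tgt)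
      false = true ∧
    (∀ k : Nat, ∀ j : Nat, j < edges.length →
      (∃ c ∈ edges.getD j [], sl edges.length c = k) →
      (loopA (inverse_graph vertices edges) fuel existed nodes).getD k false = true →
      (loopA (inverse_graph vertices edges) fuel existed nodes).getD j false = true) ∧
    (∀ S : Nat → Prop, ClosedSet edges (sl edges.length tgt) S → ∀ k : Nat,
      (loopA (inverse_graph vertices edges) fuel existed nodes).getD k false = true →
      S k) := by
  have hmem : ∀ (k : Nat) (x : Int), x ∈ (inverse_graph vertices edges).getD k [] ↔
      ∃ j : Nat, j < edges.length ∧ x = (j : Int) ∧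
        ∃ c ∈ edges.getD j [], sl edges.length c = k := by
    intro k x
    rw [mem_inverse_graph vertices edges (by rw [hn]; exact hE) k x, hn]
  induction fuel generalizing existed nodes with
  | zero => omega
  | succ f ihf =>
    by_cases hnl : nodes.isEmpty
    · have hnil : nodes = [] := List.isEmpty_iff.1 hnl
      subst hnil
      simp only [loopA, List.isEmpty_nil, if_pos]
      refine ⟨hlen2, ?_, ?_, ?_⟩
      · rcases htgtI with h | h
        · exact h
        · simp at h
      · intro k j hj hkj hk
        rcases hclosed k hk j hj hkj with h | h
        · exact h
        · simp at h
      · exact fun S hS => (hsound S hS).1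
    · obtain ⟨p1, p2, p3, p4, p5, p6, p7, p8, p9⟩ :=
        passA_spec (inverse_graph vertices edges) nodes existed []
          (by rw [length_inverse_graph, hn, hlen2])
          (fun v hv => by rw [hlen2]; exact hrange v hv)
      rw [hlen2] at p3 p4 p6 p8 p9
      simp only [loopA, hnl, if_neg, Bool.false_eq_true, not_false_eq_true]
      by_cases hex : ∃ v ∈ nodes, existed.getD (sl edges.length v) false = false
      · -- some node gets newly marked: the count of unmarked entries drops
        apply ihf
        · have := p8 hex; omega
        · rw [p1]; exact hlen2
        · intro v hv
          rcases p6 v hv with h | ⟨w, hw, hvw⟩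
          · simp at h
          · rw [hmem _ _] at hvw
            obtain ⟨j, hj, rfl, _⟩ := hvw
            constructor
            · have : (0 : Int) ≤ (j : Int) := by positivity
              omega
            · exact_mod_cast hj
        · rcases htgtI with h | h
          · exact Or.inl (p2 _ h)
          · exact Or.inl (p3 tgt h)
        · intro k hk j hj hkj
          rcases p4 k hk with hold | ⟨⟨w, hw, hws⟩, hsub⟩
          · rcases hclosed k hold j hj hkj with hjm | hjn
            · exact Or.inl (p2 j hjm)
            · have := p3 _ hjn
              rw [show sl edges.length (j : Int) = j by unfold sl; simp] at this
              exact Or.inl this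
          · refine Or.inr (hsub _ ?_)
            rw [hmem _ _]
            exact ⟨j, hj, rfl, hkj⟩
        · intro S hS
          refine ⟨?_, ?_⟩
          · intro k hk
            rcases p4 k hk with hold | ⟨⟨w, hw, hws⟩, _⟩
            · exact (hsound S hS).1 k hold
            · rw [← hws]; exact (hsound S hS).2 _ hw
          · intro v hv
            rcases p6 v hv with h | ⟨w, hw, hvw⟩
            · simp at h
            · rw [hmem _ _] at hvw
              obtain ⟨j, hj, rfl, c, hc, hcs⟩ := hvw
              rw [show sl edges.length (j : Int) = j by unfold sl; simp]
              exact hS.2 j hj ⟨c, hc, hcs ▸ (hsound S hS).2 w hw⟩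
      · -- every node in the worklist is already marked: next round the worklist is empty
        have hall : ∀ v ∈ nodes, existed.getD (sl edges.length v) false = true := by
          intro v hv
          cases h : existed.getD (sl edges.length v) false
          · exact absurd ⟨v, hv, h⟩ hex
          · rfl
        rw [p9 hall]
        obtain ⟨f', rfl⟩ : ∃ f', f = f' + 1 := ⟨f - 1, by omega⟩
        simp only [loopA, List.isEmpty_nil, if_pos]
        refine ⟨hlen2, ?_, ?_, ?_⟩
        · rcases htgtI with h | h
          · exact h
          · exact hall tgt h
        · intro k j hj hkj hk
          rcases hclosed k hk j hj hkj with h | h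
          · exact h
          · have := hall _ h
            rwa [show sl edges.length (j : Int) = j by unfold sl; simp] at this
        · exact fun S hS => (hsound S hS).1

-- ---- B's saturation pass ----
theorem passFrom_spec (edges : List (List Int)) :
    ∀ (es : List (List Int)) (s : Nat) (r : List Bool),
    r.length = edges.length → s + es.length ≤ edges.length →
    (∀ i : Nat, i < es.length → es.getD i [] = edges.getD (s + i) []) →
    (∀ l ∈ es, ∀ c ∈ l, -(edges.length : Int) ≤ c ∧ c < (edges.length : Int)) →
    ((PySem.List.enumerate es (s : Int)).foldl stepB r).length = edges.length ∧
    (∀ k : Nat, r.getD k false = true →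
      ((PySem.List.enumerate es (s : Int)).foldl stepB r).getD k false = true) ∧
    (∀ S : Nat → Prop,
      (∀ j : Nat, j < edges.length →
        (∃ c ∈ edges.getD j [], S (sl edges.length c)) → S j) →
      (∀ k : Nat, r.getD k false = true → S k) →
      ∀ k : Nat, ((PySem.List.enumerate es (s : Int)).foldl stepB r).getD k false = true → S k) ∧
    (∀ i : Nat, i < es.length →
      (∃ c ∈ es.getD i [], r.getD (sl edges.length c) false = true) →
      ((PySem.List.enumerate es (s : Int)).foldl stepB r).getD (s + i) false = true) ∧
    ((PySem.List.enumerate es (s : Int)).foldl stepB r = r ∨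
      ((PySem.List.enumerate es (s : Int)).foldl stepB r).count false < r.count false) := by
  intro es
  induction es with
  | nil =>
    intro s r hr _ _ _
    refine ⟨hr, fun k h => h, fun S _ hrS k hk => hrS k hk, ?_, Or.inl rfl⟩
    intro i hi
    simp at hi
  | cons e t ih =>
    intro s r hr hs hsub hE
    have hsn : s < edges.length := by simp at hs; omega
    have hbr : ∀ c ∈ e, -(r.length : Int) ≤ c ∧ c < (r.length : Int) := by
      intro c hc
      have := hE e (by simp) c hc
      omega
    have hany : (e.any (fun c => PySem.List.pyGetD r c false)) = true ↔
        ∃ c ∈ e, r.getD (sl edges.length c) false = true := by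
      rw [List.any_eq_true]
      constructor
      · rintro ⟨c, hc, hval⟩
        rw [pyGetD_sl r c false false (hbr c hc).1 (hbr c hc).2, hr] at hval
        exact ⟨c, hc, hval⟩
      · rintro ⟨c, hc, hval⟩
        refine ⟨c, hc, ?_⟩
        rw [pyGetD_sl r c false false (hbr c hc).1 (hbr c hc).2, hr]
        exact hval
    have hecons : PySem.List.enumerate (e :: t) (s : Int) =
        ((s : Int), e) :: PySem.List.enumerate t ((s + 1 : Nat) : Int) := by
      rw [PySem.List.enumerate_cons]
      push_cast
      rfl
    have hstep : stepB r ((s : Int), e) =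
        (if r.getD s false = false ∧ (∃ c ∈ e, r.getD (sl edges.length c) false = true) then
          r.set s true else r) := by
      unfold stepB
      simp only [PySem.List.pyGetD_natCast, PySem.List.pySetD_natCast]
      by_cases h2 : ∃ c ∈ e, r.getD (sl edges.length c) false = true
      · have hany' : (e.any fun c => PySem.List.pyGetD r c false) = true := hany.2 h2
        by_cases h1 : r.getD s false = false
        · rw [if_pos (by rw [h1, hany']; rfl), if_pos ⟨h1, h2⟩]
        · have h1' : r.getD s false = true := by
            cases h : r.getD s false
            · exact absurd h h1
            · rfl
          rw [if_neg (by rw [h1', hany']; simp), if_neg (by tauto)]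
      · have hany' : (e.any fun c => PySem.List.pyGetD r c false) = false := by
          cases h : (e.any fun c => PySem.List.pyGetD r c false)
          · rfl
          · exact absurd (hany.1 h) h2
        rw [if_neg (by rw [hany']; simp), if_neg (fun h => h2 h.2)]
    have hsub' : ∀ i : Nat, i < t.length → t.getD i [] = edges.getD (s + 1 + i) [] := by
      intro i hi
      have := hsub (i + 1) (by simp; omega)
      simpa [show s + (i + 1) = s + 1 + i by omega] using this
    have hE' : ∀ l ∈ t, ∀ c ∈ l, -(edges.length : Int) ≤ c ∧ c < (edges.length : Int) :=
      fun l hl => hE l (by simp [hl])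
    rw [hecons, List.foldl_cons, hstep]
    by_cases hcond : r.getD s false = false ∧ ∃ c ∈ e, r.getD (sl edges.length c) false = true
    · rw [if_pos hcond]
      have hset : ∀ k : Nat, r.getD k false = true → (r.set s true).getD k false = true := by
        intro k hk
        by_cases hks : k = s
        · subst hks; exact getD_set_self _ _ _ _ (by omega)
        · rw [getD_set_ne _ _ _ _ _ hks]; exact hk
      obtain ⟨i1, i2, i3, i4, i5⟩ := ih (s + 1) (r.set s true) (by simp [hr])
        (by simp at hs ⊢; omega) hsub' hE'
      refine ⟨i1, fun k hk => i2 k (hset k hk), ?_, ?_, ?_⟩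
      · intro S hSc hrS k hk
        refine i3 S hSc ?_ k hk
        intro k' hk'
        by_cases hks : k' = s
        · rw [hks]
          refine hSc s hsn ?_
          obtain ⟨c, hc, hcv⟩ := hcond.2
          refine ⟨c, ?_, hrS _ hcv⟩
          have h0 := hsub 0 (by simp)
          simp only [Nat.add_zero] at h0
          rw [← h0]
          simpa using hc
        · rw [getD_set_ne _ _ _ _ _ hks] at hk'
          exact hrS k' hk'
      · intro i hi
        cases i with
        | zero =>
          intro _
          simpa using i2 s (getD_set_self _ _ _ _ (by omega))
        | succ i =>
          rintro ⟨c, hc, hcv⟩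
          have hi' : i < t.length := by simpa using hi
          have := i4 i hi' ⟨c, by simpa using hc, hset _ hcv⟩
          simpa [show s + 1 + i = s + (i + 1) by omega] using this
      · right
        have hlt : (r.set s true).count false < r.count false :=
          count_false_set_true_lt r s (by omega) hcond.1
        rcases i5 with h | h
        · rw [h]; exact hlt
        · exact lt_trans h hlt
    · rw [if_neg hcond]
      obtain ⟨i1, i2, i3, i4, i5⟩ := ih (s + 1) r hr (by simp at hs ⊢; omega) hsub' hE'
      refine ⟨i1, i2, fun S hSc hrS k hk => i3 S hSc hrS k hk, ?_, i5⟩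
      intro i hi
      cases i with
      | zero =>
        intro hpre
        have hex : ∃ c ∈ e, r.getD (sl edges.length c) false = true := by simpa using hpre
        have hrs : r.getD s false = true := by
          cases h : r.getD s false
          · exact absurd ⟨h, hex⟩ hcond
          · rfl
        simpa using i2 s hrs
      | succ i =>
        rintro ⟨c, hc, hcv⟩
        have hi' : i < t.length := by simpa using hi
        have := i4 i hi' ⟨c, by simpa using hc, hcv⟩
        simpa [show s + 1 + i = s + (i + 1) by omega] using this

theorem passB_spec (edges : List (List Int)) (r : List Bool)
    (hr : r.length = edges.length)
    (hE : ∀ l ∈ edges, ∀ c ∈ l, -(edges.length : Int) ≤ c ∧ c < (edges.length : Int)) :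
    (passB edges r).length = edges.length ∧
    (∀ k : Nat, r.getD k false = true → (passB edges r).getD k false = true) ∧
    (∀ S : Nat → Prop,
      (∀ j : Nat, j < edges.length →
        (∃ c ∈ edges.getD j [], S (sl edges.length c)) → S j) →
      (∀ k : Nat, r.getD k false = true → S k) →
      ∀ k : Nat, (passB edges r).getD k false = true → S k) ∧
    (∀ j : Nat, j < edges.length →
      (∃ c ∈ edges.getD j [], r.getD (sl edges.length c) false = true) →
      (passB edges r).getD j false = true) ∧
    (passB edges r = r ∨ (passB edges r).count false < r.count false) := by
  obtain ⟨i1, i2, i3, i4, i5⟩ := passFrom_spec edges edges 0 r hr (by omega)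
    (fun i _ => by simp) hE
  exact ⟨i1, i2, i3, fun j hj h => by simpa using i4 j hj h, i5⟩

-- ===== VERDICT (by name: the statement is the Claim_ definition above) =====
theorem end_reachable_from_children_spec : Claim_equal_end_reachable_from_children := by
  intro vertices edges _ hPre
  unfold Spec_end_reachable_from_children
  rcases hPre with hnil | ⟨hv, hveq, hE, htgt0, htgtn⟩
  · subst hnil
    rfl
  · have hne : ¬ edges.length = 0 := by omega
    have hnpos : 0 < edges.length := by omega
    have htg : PySem.List.pyGetD vertices (-1) 0 = vertices.getLastD 0 := by
      rw [PySem.List.pyGetD_neg_one (h := hv)]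
      simp [List.getLastD_eq_getLast?, List.getLast?_eq_some_getLast hv]
    set tgt := vertices.getLastD 0 with htgdef
    set ts := sl edges.length tgt with htsdef
    have hts : ts < edges.length := sl_lt _ _ htgt0 htgtn
    set AF := loopA (inverse_graph vertices edges) (2 * edges.length + 2)
      (edges.map fun _ => false) [tgt] with hAFdef
    set r1 := (List.replicate edges.length false).set ts true with hr1def
    set BF := (passB edges)^[edges.length] r1 with hBFdef
    have hA : end_reachable_from_children vertices edges =
        (PySem.List.pyGetD edges 0 []).foldl
          (fun t child => PySem.List.pyGetD AF child false && t) true := by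
      unfold end_reachable_from_children
      rw [if_neg hne]
      simp only [htg]
      rfl
    have hB : end_reachable_from_children_alt vertices edges =
        (PySem.List.pyGetD edges 0 []).all (fun c => PySem.List.pyGetD BF c false) := by
      unfold end_reachable_from_children_alt
      rw [if_neg hne]
      simp only [htg]
      have hinit : PySem.List.pySetD (List.replicate edges.length false) tgt true = r1 := by
        rw [pySetD_sl (List.replicate edges.length false) tgt true
          (by simp only [List.length_replicate]; exact htgt0)
          (by simp only [List.length_replicate]; exact htgtn)]
        simp only [List.length_replicate]
        rfl
      rw [hinit, foldl_const_iterate, PySem.List.length_pyRange_one]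
      norm_num
      rfl
    -- A's loop invariants hold initially, so its final array is the least closed slot set
    obtain ⟨hAlen, hAtgt, hAcl, hAle⟩ :=
      loopA_spec vertices edges hE hveq.symm tgt (2 * edges.length + 2)
        (edges.map fun _ => false) [tgt]
        (by have := List.count_le_length (a := false) (l := edges.map fun _ => false)
            simp only [List.length_map] at this
            omega)
        (by simp)
        (by intro v hv'; simp only [List.mem_singleton] at hv'; subst hv'; exact ⟨htgt0, htgtn⟩)
        (Or.inr (List.mem_singleton.2 rfl))
        (by intro k hk; rw [getD_map_const_false] at hk; cases hk)
        (by intro S hS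
            refine ⟨?_, ?_⟩
            · intro k hk; rw [getD_map_const_false] at hk; cases hk
            · intro v hv'; simp only [List.mem_singleton] at hv'; subst hv'; exact hS.1)
    -- B's saturation: length, monotonicity, soundness, and a fixpoint after n passes
    have hlenIter : ∀ k : Nat, ((passB edges)^[k] r1).length = edges.length := by
      intro k
      induction k with
      | zero => simp [hr1def]
      | succ k ih =>
        rw [Function.iterate_succ_apply']
        exact (passB_spec edges _ ih hE).1
    have hts_mem : ∀ k : Nat, ((passB edges)^[k] r1).getD ts false = true := by
      intro k
      induction k with
      | zero => exact getD_set_self _ _ _ _ (by simpa using hts)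
      | succ k ih =>
        rw [Function.iterate_succ_apply']
        exact (passB_spec edges _ (hlenIter k) hE).2.1 ts ih
    have hsound_iter : ∀ S : Nat → Prop, ClosedSet edges ts S → ∀ (k : Nat) (x : Nat),
        ((passB edges)^[k] r1).getD x false = true → S x := by
      intro S hS k
      induction k with
      | zero =>
        intro x hx
        by_cases hxts : x = ts
        · subst hxts; exact hS.1
        · rw [Function.iterate_zero_apply, hr1def, getD_set_ne _ _ _ _ _ hxts,
            getD_replicate_false] at hx
          cases hx
      | succ k ih =>
        intro x hx
        rw [Function.iterate_succ_apply'] at hx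
        exact (passB_spec edges _ (hlenIter k) hE).2.2.1 S hS.2 ih x hx
    have hfix : passB edges BF = BF := by
      have key : ∀ k : Nat, passB edges ((passB edges)^[k] r1) = (passB edges)^[k] r1 ∨
          ((passB edges)^[k] r1).count false + k < edges.length := by
        intro k
        induction k with
        | zero =>
          right
          have h0 : (List.replicate edges.length false).count false = edges.length := by
            simp
          have := count_false_set_true_lt (List.replicate edges.length false) ts
            (by simpa using hts) (getD_replicate_false _ _)
          rw [h0] at this
          simpa [hr1def] using this
        | succ k ih =>
          rcases ih with hfx | hct
          · left
            rw [Function.iterate_succ_apply', hfx, hfx]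
          · rcases (passB_spec edges _ (hlenIter k) hE).2.2.2.2 with heq | hlt
            · left
              rw [Function.iterate_succ_apply', heq, heq]
            · right
              rw [Function.iterate_succ_apply']
              omega
      rcases key edges.length with h | h
      · exact h
      · omega
    have hBclosed : ∀ j : Nat, j < edges.length →
        (∃ c ∈ edges.getD j [], BF.getD (sl edges.length c) false = true) →
        BF.getD j false = true := by
      intro j hj hex
      have := (passB_spec edges BF (hlenIter edges.length) hE).2.2.2.1 j hj hex
      rwa [hfix] at this
    -- both arrays are the least closed slot set, so they agree pointwise
    have hMAclosed : ClosedSet edges ts (fun k => AF.getD k false = true) := by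
      refine ⟨hAtgt, ?_⟩
      rintro j hj ⟨c, hc, hS⟩
      exact hAcl (sl edges.length c) j hj ⟨c, hc, rfl⟩ hS
    have hMBclosed : ClosedSet edges ts (fun k => BF.getD k false = true) :=
      ⟨hts_mem edges.length, hBclosed⟩
    have hAtoB : ∀ k : Nat, AF.getD k false = true → BF.getD k false = true :=
      hAle _ hMBclosed
    have hBtoA : ∀ k : Nat, BF.getD k false = true → AF.getD k false = true :=
      fun k hk => hsound_iter _ hMAclosed edges.length k hk
    have hslot : ∀ k : Nat, AF.getD k false = BF.getD k false := by
      intro k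
      cases h1 : AF.getD k false with
      | true => exact (hAtoB k h1).symm
      | false =>
        cases h2 : BF.getD k false with
        | false => rfl
        | true => rw [hBtoA k h2] at h1; cases h1
    -- pointwise agreement on the children of edges[0]
    have hhead : edges.getD 0 [] ∈ edges := by
      cases edges with
      | nil => exact absurd rfl hne
      | cons e t => simp [List.getD]
    have hpoint : ∀ c ∈ PySem.List.pyGetD edges 0 [],
        PySem.List.pyGetD AF c false = PySem.List.pyGetD BF c false := by
      intro c hc
      rw [PySem.List.pyGetD_zero] at hc
      obtain ⟨hc0, hc1⟩ := hE _ hhead c hc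
      rw [pyGetD_sl AF c false false (by rw [hAlen]; exact hc0) (by rw [hAlen]; exact hc1),
        pyGetD_sl BF c false false (by rw [hlenIter]; exact hc0)
          (by rw [hlenIter]; exact hc1), hAlen, hlenIter]
      exact hslot _
    rw [hA, hB, foldl_and_all, Bool.and_true]
    exact all_congr_mem _ _ _ hpoint
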